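-- pv_equiv track=rewrite | github.com/johanbjorn/live-streaming-with-automated-multi-language-subtitling | source/startcelebritydetection/startcelebritydetection.py | get_last_segment_name
-- ===== SOURCE A (Python) =====
-- def get_last_segment_name(child_manifest):
--     child_manifest = child_manifest.split('\n')
--     child_manifest.reverse()
--     for x in child_manifest:
--         if '.ts' in x:
--             segment_name = x
--             return segment_name
--     return "ERROR"
-- ===== SOURCE B (Python) =====
-- def get_last_segment_name(child_manifest):
--     result = "ERROR"
--     for line in child_manifest.split('\n'):
--         if '.ts' in line:
--             result = line
--     return result
-- ===== Notes on version B (the rewrite author's own statement) =====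
-- stated objective: simpler
-- what changed: B scans the lines in forward order keeping a running last-match accumulator, instead of reversing the list and returning the first match.
import Mathlib
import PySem

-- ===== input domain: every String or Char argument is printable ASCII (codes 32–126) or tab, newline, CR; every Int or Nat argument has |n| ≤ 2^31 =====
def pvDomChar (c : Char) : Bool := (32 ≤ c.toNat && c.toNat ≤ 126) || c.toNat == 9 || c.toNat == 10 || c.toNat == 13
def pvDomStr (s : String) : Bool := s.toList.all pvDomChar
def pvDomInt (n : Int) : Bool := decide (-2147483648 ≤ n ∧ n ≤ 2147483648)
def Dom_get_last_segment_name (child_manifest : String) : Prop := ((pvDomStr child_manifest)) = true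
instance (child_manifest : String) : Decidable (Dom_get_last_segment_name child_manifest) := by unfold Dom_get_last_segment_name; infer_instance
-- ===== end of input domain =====

-- B replaces A's reverse-and-return-first-match loop by a single forward pass
-- keeping a running last-match accumulator (objective: simpler).

-- ===== PORT A =====
-- for x in reversed lines: if '.ts' in x: return x; after the loop: "ERROR"
def pvFindA : List String → String
  | [] => "ERROR"
  | x :: rest => if PySem.Str.isIn ".ts" x then x else pvFindA rest

def get_last_segment_name (child_manifest : String) : String :=
  pvFindA ((PySem.Str.split? child_manifest "\n").getD []).reverse

-- ===== PORT B =====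
def get_last_segment_name_alt (child_manifest : String) : String :=
  ((PySem.Str.split? child_manifest "\n").getD []).foldl
    (fun result line => if PySem.Str.isIn ".ts" line then line else result) "ERROR"

-- ===== PRECONDITION & SPEC =====
def Spec_get_last_segment_name (child_manifest : String) (out : String) : Prop := out = get_last_segment_name_alt child_manifest
instance (child_manifest : String) (out : String) : Decidable (Spec_get_last_segment_name child_manifest out) := by unfold Spec_get_last_segment_name; infer_instance

-- ===== CLAIM (what is proved, stated in full; the proofs are below) =====
def Claim_equal_get_last_segment_name : Prop := ∀ (child_manifest : String), Dom_get_last_segment_name child_manifest → Spec_get_last_segment_name child_manifest (get_last_segment_name child_manifest)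

-- ===== LEMMAS AND PROOFS =====

-- A's "first match of the reversed list" equals B's forward last-match fold.
theorem pvFindA_reverse_eq_foldl (xs : List String) :
    pvFindA xs.reverse =
      xs.foldl (fun result line => if PySem.Str.isIn ".ts" line then line else result) "ERROR" := by
  induction xs using List.reverseRecOn with
  | nil => rfl
  | append_singleton l a ih =>
      rw [List.reverse_append, List.reverse_singleton, List.singleton_append,
        List.foldl_append, List.foldl_cons, List.foldl_nil, pvFindA, ih]

-- ===== VERDICT (by name: the statement is the Claim_ definition above) =====
theorem get_last_segment_name_spec : Claim_equal_get_last_segment_name := by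
  intro s _
  unfold Spec_get_last_segment_name get_last_segment_name get_last_segment_name_alt
  exact pvFindA_reverse_eq_foldl _
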